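-- pv_equiv track=rewrite | github.com/PhoenixZ810/MM-HELIX | sandbox/generator/tapa_generator.py | _get_clue_numbers
-- ===== SOURCE A (Python) =====
-- from collections import deque
--
-- def _get_clue_numbers(grid, row, col, rows, cols):
--     """Get the clue numbers for a cell based on surrounding black cells"""
--     if grid[row][col]:
--         return []
--
--     directions = [(-1, -1), (-1, 0), (-1, 1),
--                  (0, -1),          (0, 1),
--                  (1, -1),  (1, 0), (1, 1)]
--
--     adjacent = []
--     for dr, dc in directions:
--         r = row + dr
--         c = col + dc
--         if 0 <= r < rows and 0 <= c < cols:
--             adjacent.append((r, c))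
--
--     black_cells = [(r, c) for (r, c) in adjacent if grid[r][c]]
--     if not black_cells:
--         return [0]
--
--     # 找到连通的黑色格子组
--     visited = set()
--     groups = []
--     black_cell_set = set(black_cells)
--
--     for r, c in black_cells:
--         if (r, c) not in visited:
--             # 开始一个新的连通分量
--             group_size = 0
--             queue = deque([(r, c)])
--             visited.add((r, c))
--
--             while queue:
--                 cr, cc = queue.popleft()
--                 group_size += 1
--
--                 # 检查8方向邻居（包括斜对角），与评测器分组规则保持一致
--                 for dr, dc in [
--                     (-1, -1), (-1, 0), (-1, 1),
--                     (0, -1),            (0, 1),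
--                     (1, -1),  (1, 0),  (1, 1),
--                 ]:
--                     nr, nc = cr + dr, cc + dc
--                     if (nr, nc) in black_cell_set and (nr, nc) not in visited:
--                         visited.add((nr, nc))
--                         queue.append((nr, nc))
--
--             groups.append(group_size)
--
--     groups.sort()
--     return groups if groups else [0]
-- ===== SOURCE B (Python) =====
-- def _get_clue_numbers(grid, row, col, rows, cols):
--     """Tapa clue numbers via pairwise union-find over the black neighbor cells (no BFS queue)."""
--     if grid[row][col]:
--         return []
--     directions = [(-1, -1), (-1, 0), (-1, 1),
--                   (0, -1),           (0, 1),
--                   (1, -1),  (1, 0),  (1, 1)]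
--     black = [(row + dr, col + dc) for dr, dc in directions
--              if (0 <= row + dr < rows and 0 <= col + dc < cols)
--              and grid[row + dr][col + dc]]
--     if not black:
--         return [0]
--     parent = {c: c for c in black}
--
--     def find(x):
--         while parent[x] != x:
--             x = parent[x]
--         return x
--
--     for i, a in enumerate(black):
--         for b in black[i + 1:]:
--             if abs(a[0] - b[0]) <= 1 and abs(a[1] - b[1]) <= 1:
--                 ra, rb = find(a), find(b)
--                 if ra != rb:
--                     parent[rb] = ra
--     sizes = {}
--     for c in black:
--         r = find(c)
--         sizes[r] = sizes.get(r, 0) + 1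
--     return sorted(sizes.values())
-- ===== Notes on version B (the rewrite author's own statement) =====
-- stated objective: alternative
-- what changed: The BFS-with-queue connected-component grouping over the black neighbor cells is replaced by a pairwise union-find (parent forest) whose per-root counts are sorted; Pre_ only excludes inputs where A raises IndexError (out-of-range cell or a bounds-passing neighbor missing from a ragged/overstated grid).
import Mathlib
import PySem

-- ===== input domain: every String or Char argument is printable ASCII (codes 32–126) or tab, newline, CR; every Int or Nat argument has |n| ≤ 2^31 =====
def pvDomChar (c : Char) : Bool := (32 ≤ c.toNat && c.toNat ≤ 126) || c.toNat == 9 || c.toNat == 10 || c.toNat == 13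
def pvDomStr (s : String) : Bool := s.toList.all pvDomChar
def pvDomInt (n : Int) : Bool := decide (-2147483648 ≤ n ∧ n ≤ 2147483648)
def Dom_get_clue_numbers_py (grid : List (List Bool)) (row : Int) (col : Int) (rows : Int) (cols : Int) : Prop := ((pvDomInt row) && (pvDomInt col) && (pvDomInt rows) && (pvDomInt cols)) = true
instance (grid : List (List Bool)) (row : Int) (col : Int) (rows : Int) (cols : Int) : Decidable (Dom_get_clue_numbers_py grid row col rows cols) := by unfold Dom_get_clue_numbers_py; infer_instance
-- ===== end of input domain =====

-- B replaces A's BFS-queue component grouping by a pairwise union-find over the same black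
-- neighbor cells (alternative decomposition, same asymptotic cost on the ≤8-cell neighborhood).

-- ===== PORT A =====
-- shared literal: the 8 directions, in A's (and B's) order
def pvDirs : List (Int × Int) :=
  [(-1, -1), (-1, 0), (-1, 1), (0, -1), (0, 1), (1, -1), (1, 0), (1, 1)]

-- grid[r][c]; the `.getD false` default is never read under Pre_ (which demands the lookup succeed)
def pvAt (grid : List (List Bool)) (r c : Int) : Bool :=
  ((PySem.List.pyGet? grid r).bind (fun rw => PySem.List.pyGet? rw c)).getD false

-- A's inner `while queue:` loop; fuel only makes the recursion structural (each iteration pops a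
-- queue cell, and at most |black set| cells are ever enqueued, so `length+1` fuel is never exhausted)
def pvBfsA (blackSet : PySem.Set (Int × Int)) :
    Nat → List (Int × Int) → PySem.Set (Int × Int) → Int → Int × PySem.Set (Int × Int)
  | _, [], visited, size => (size, visited)
  | 0, _, visited, size => (size, visited)
  | fuel + 1, cell :: queue, visited, size =>
      let st := pvDirs.foldl
        (fun (st : List (Int × Int) × PySem.Set (Int × Int)) d =>
          let n := (cell.1 + d.1, cell.2 + d.2)
          if PySem.Set.contains blackSet n = true ∧ PySem.Set.contains st.2 n = false then
            (st.1 ++ [n], PySem.Set.add st.2 n)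
          else st)
        (queue, visited)
      pvBfsA blackSet fuel st.1 st.2 (size + 1)

-- A's outer `for r, c in black_cells:` loop, state = (groups, visited)
def pvGroupsA (black_cells : List (Int × Int)) : List Int :=
  let blackSet := PySem.Set.ofList black_cells
  (black_cells.foldl
    (fun (st : List Int × PySem.Set (Int × Int)) rc =>
      if PySem.Set.contains st.2 rc = true then st
      else
        let v := PySem.Set.add st.2 rc
        let r := pvBfsA blackSet (black_cells.length + 1) [rc] v 0
        (st.1 ++ [r.1], r.2))
    ([], PySem.Set.empty)).1

def get_clue_numbers_py (grid : List (List Bool)) (row : Int) (col : Int) (rows : Int) (cols : Int) : List Int :=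
  if pvAt grid row col then []
  else
    let adjacent := pvDirs.foldl
      (fun acc d =>
        if 0 ≤ row + d.1 ∧ row + d.1 < rows ∧ 0 ≤ col + d.2 ∧ col + d.2 < cols then
          acc ++ [(row + d.1, col + d.2)]
        else acc) []
    let black_cells := adjacent.filter (fun rc => pvAt grid rc.1 rc.2)
    if black_cells = [] then [0]
    else
      let groups := PySem.List.sorted (pvGroupsA black_cells) (fun x => x) false
      if groups ≠ [] then groups else [0]

-- ===== PORT B =====
-- B's `find` while-loop; fuel = number of dict entries (a parent forest chain is shorter)
def pvFind (parent : PySem.Dict (Int × Int) (Int × Int)) :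
    Nat → (Int × Int) → (Int × Int)
  | 0, x => x
  | fuel + 1, x =>
      let p := parent.getD x x
      if p ≠ x then pvFind parent fuel p else x

-- B's pairwise union loop: `for i, a in enumerate(black): for b in black[i+1:]: …`
def pvUnionAll (black : List (Int × Int)) : PySem.Dict (Int × Int) (Int × Int) :=
  let parent0 := black.foldl (fun d c => d.insert c c) PySem.Dict.empty
  (PySem.List.enumerate black).foldl
    (fun parent ia =>
      (PySem.List.slice black (some (ia.1 + 1)) none).foldl
        (fun parent b =>
          if |ia.2.1 - b.1| ≤ 1 ∧ |ia.2.2 - b.2| ≤ 1 then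
            let ra := pvFind parent (PySem.Dict.size parent) ia.2
            let rb := pvFind parent (PySem.Dict.size parent) b
            if ra ≠ rb then parent.insert rb ra else parent
          else parent)
        parent)
    parent0

-- B's tally-and-sort: sizes[find(c)] += 1, then sorted(sizes.values())
def pvSizesB (black : List (Int × Int)) : List Int :=
  let parent := pvUnionAll black
  let sizes := black.foldl
    (fun (d : PySem.Dict (Int × Int) Int) c =>
      let r := pvFind parent (PySem.Dict.size parent) c
      d.insert r (d.getD r 0 + 1))
    PySem.Dict.empty
  PySem.List.sorted (PySem.Dict.values sizes) (fun x => x) false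

def get_clue_numbers_py_alt (grid : List (List Bool)) (row : Int) (col : Int) (rows : Int) (cols : Int) : List Int :=
  if pvAt grid row col then []
  else
    let black := pvDirs.foldl
      (fun acc d =>
        if (0 ≤ row + d.1 ∧ row + d.1 < rows ∧ 0 ≤ col + d.2 ∧ col + d.2 < cols) ∧
            pvAt grid (row + d.1) (col + d.2) = true then
          acc ++ [(row + d.1, col + d.2)]
        else acc) []
    if black = [] then [0]
    else pvSizesB black

-- ===== PRECONDITION & SPEC =====
-- Pre_ excludes exactly the inputs where A raises IndexError: the center lookup grid[row][col]
-- fails, or (center white) some neighbor passing the 0≤r<rows/0≤c<cols test is missing from the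
-- actual grid (ragged row or rows/cols larger than the grid).
def Pre_get_clue_numbers_py (grid : List (List Bool)) (row : Int) (col : Int) (rows : Int) (cols : Int) : Prop :=
  (((PySem.List.pyGet? grid row).bind (fun rw => PySem.List.pyGet? rw col)).isSome = true) ∧
  (((PySem.List.pyGet? grid row).bind (fun rw => PySem.List.pyGet? rw col)) = some false →
    ∀ d ∈ pvDirs, (0 ≤ row + d.1 ∧ row + d.1 < rows ∧ 0 ≤ col + d.2 ∧ col + d.2 < cols) →
      ((PySem.List.pyGet? grid (row + d.1)).bind (fun rw => PySem.List.pyGet? rw (col + d.2))).isSome = true)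

instance (grid : List (List Bool)) (row : Int) (col : Int) (rows : Int) (cols : Int) : Decidable (Pre_get_clue_numbers_py grid row col rows cols) := by
  unfold Pre_get_clue_numbers_py; infer_instance

def pvWitness_get_clue_numbers_py : List (List Bool) × Int × Int × Int × Int :=
  ([[false, true], [true, false]], 0, 0, 2, 2)

def Spec_get_clue_numbers_py (grid : List (List Bool)) (row : Int) (col : Int) (rows : Int) (cols : Int) (out : List Int) : Prop := out = get_clue_numbers_py_alt grid row col rows cols
instance (grid : List (List Bool)) (row : Int) (col : Int) (rows : Int) (cols : Int) (out : List Int) : Decidable (Spec_get_clue_numbers_py grid row col rows cols out) := by unfold Spec_get_clue_numbers_py; infer_instance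

-- ===== CLAIM (what is proved, stated in full; the proofs are below) =====
def Claim_equal_get_clue_numbers_py : Prop := ∀ (grid : List (List Bool)) (row : Int) (col : Int) (rows : Int) (cols : Int), Dom_get_clue_numbers_py grid row col rows cols → Pre_get_clue_numbers_py grid row col rows cols → Spec_get_clue_numbers_py grid row col rows cols (get_clue_numbers_py grid row col rows cols)

-- ===== LEMMAS AND PROOFS =====

-- the translation by the clue cell's coordinates: every black neighbor is pvT row col d for a direction d
def pvT (row col : Int) (d : Int × Int) : Int × Int := (row + d.1, col + d.2)

lemma pvT_inj {row col : Int} {a b : Int × Int} : pvT row col a = pvT row col b ↔ a = b := by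
  simp only [pvT, Prod.ext_iff]
  omega

lemma pvT_beq (row col : Int) (a b : Int × Int) :
    (pvT row col a == pvT row col b) = (a == b) := by
  by_cases h : a = b
  · subst h; simp
  · have h' : pvT row col a ≠ pvT row col b := fun e => h (pvT_inj.mp e)
    simp [h, h']

lemma pvT_ne {row col : Int} {a b : Int × Int} : pvT row col a ≠ pvT row col b ↔ a ≠ b :=
  not_congr pvT_inj

-- generic loop-state transport: a fold over mapped elements tracks the fold over the originals
lemma pv_foldl_map_transport {α β σ τ : Type} (F : σ → α → σ) (G : τ → β → τ) (f : σ → τ) (e : α → β)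
    (h : ∀ s a, G (f s) (e a) = f (F s a)) :
    ∀ (l : List α) (s : σ), (l.map e).foldl G (f s) = f (l.foldl F s)
  | [], _ => rfl
  | a :: l, s => by
      rw [List.map_cons, List.foldl_cons, List.foldl_cons, h,
        pv_foldl_map_transport F G f e h l]

-- ---- PySem.Set transport along pvT ----
lemma pvSet_mem_map {row col : Int} {s : List (Int × Int)} {x : Int × Int} :
    pvT row col x ∈ s.map (pvT row col) ↔ x ∈ s := by
  constructor
  · intro h
    rcases List.mem_map.mp h with ⟨y, hy, he⟩
    rwa [← pvT_inj.mp he]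
  · intro h
    exact List.mem_map.mpr ⟨x, h, rfl⟩

lemma pvSet_contains_map (row col : Int) (s : PySem.Set (Int × Int)) (x : Int × Int) :
    PySem.Set.contains (s.map (pvT row col)) (pvT row col x) = PySem.Set.contains s x := by
  by_cases h : x ∈ s
  · rw [(PySem.Set.contains_iff _ _).mpr h, (PySem.Set.contains_iff _ _).mpr (pvSet_mem_map.mpr h)]
  · have h1 : PySem.Set.contains s x = false := by
      rcases Bool.eq_false_or_eq_true (PySem.Set.contains s x) with ht | hf
      · exact absurd ((PySem.Set.contains_iff _ _).mp ht) h
      · exact hf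
    have h2 : PySem.Set.contains (s.map (pvT row col)) (pvT row col x) = false := by
      rcases Bool.eq_false_or_eq_true (PySem.Set.contains (s.map (pvT row col)) (pvT row col x)) with ht | hf
      · exact absurd (pvSet_mem_map.mp ((PySem.Set.contains_iff _ _).mp ht)) h
      · exact hf
    rw [h1, h2]

lemma pvSet_add_map (row col : Int) (s : PySem.Set (Int × Int)) (x : Int × Int) :
    PySem.Set.add (s.map (pvT row col)) (pvT row col x) = (PySem.Set.add s x).map (pvT row col) := by
  by_cases h : x ∈ s
  · rw [PySem.Set.add_of_mem (pvSet_mem_map.mpr h), PySem.Set.add_of_mem h]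
  · rw [PySem.Set.add_of_not_mem (fun hc => h (pvSet_mem_map.mp hc)), PySem.Set.add_of_not_mem h,
      List.map_append]
    rfl

lemma pvSet_ofList_map (row col : Int) (l : List (Int × Int)) :
    PySem.Set.ofList (l.map (pvT row col)) = (PySem.Set.ofList l).map (pvT row col) := by
  rw [PySem.Set.ofList_eq_foldl, PySem.Set.ofList_eq_foldl]
  have := pv_foldl_map_transport (σ := PySem.Set (Int × Int)) (τ := PySem.Set (Int × Int))
    PySem.Set.add PySem.Set.add (fun s => s.map (pvT row col)) (pvT row col)
    (fun s a => pvSet_add_map row col s a) l []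
  simpa using this

-- ---- BFS transport ----
lemma pvBfsA_map (row col : Int) (bs : PySem.Set (Int × Int)) :
    ∀ (fuel : Nat) (q : List (Int × Int)) (v : PySem.Set (Int × Int)) (size : Int),
      pvBfsA (bs.map (pvT row col)) fuel (q.map (pvT row col)) (v.map (pvT row col)) size
        = ((pvBfsA bs fuel q v size).1, (pvBfsA bs fuel q v size).2.map (pvT row col))
  | fuel, [], v, size => by cases fuel <;> simp [pvBfsA]
  | 0, _ :: _, v, size => by simp [pvBfsA]
  | fuel + 1, cell :: queue, v, size => by
      rw [List.map_cons]
      show pvBfsA (bs.map (pvT row col)) (fuel + 1)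
          (pvT row col cell :: queue.map (pvT row col)) (v.map (pvT row col)) size = _
      simp only [pvBfsA]
      have hstep : ∀ (st : List (Int × Int) × PySem.Set (Int × Int)) (d : Int × Int),
          (let n := ((pvT row col cell).1 + d.1, (pvT row col cell).2 + d.2)
           if PySem.Set.contains (bs.map (pvT row col)) n = true ∧
               PySem.Set.contains (st.1.map (pvT row col), st.2.map (pvT row col)).2 n = false then
             ((st.1.map (pvT row col), st.2.map (pvT row col)).1 ++ [n],
              PySem.Set.add (st.1.map (pvT row col), st.2.map (pvT row col)).2 n)
           else (st.1.map (pvT row col), st.2.map (pvT row col)))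
          = ((let n := (cell.1 + d.1, cell.2 + d.2)
              if PySem.Set.contains bs n = true ∧ PySem.Set.contains st.2 n = false then
                (st.1 ++ [n], PySem.Set.add st.2 n)
              else st).1.map (pvT row col),
             (let n := (cell.1 + d.1, cell.2 + d.2)
              if PySem.Set.contains bs n = true ∧ PySem.Set.contains st.2 n = false then
                (st.1 ++ [n], PySem.Set.add st.2 n)
              else st).2.map (pvT row col)) := by
        intro st d
        have hn : ((pvT row col cell).1 + d.1, (pvT row col cell).2 + d.2)
            = pvT row col (cell.1 + d.1, cell.2 + d.2) := by
          simp [pvT, add_assoc]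
        rw [hn]
        simp only [pvSet_contains_map]
        by_cases hcond : PySem.Set.contains bs (cell.1 + d.1, cell.2 + d.2) = true ∧
            PySem.Set.contains st.2 (cell.1 + d.1, cell.2 + d.2) = false
        · rw [if_pos hcond, if_pos hcond]
          simp [pvSet_add_map, List.map_append]
        · rw [if_neg hcond, if_neg hcond]
      have htr := pv_foldl_map_transport
        (F := fun (st : List (Int × Int) × PySem.Set (Int × Int)) d =>
          let n := (cell.1 + d.1, cell.2 + d.2)
          if PySem.Set.contains bs n = true ∧ PySem.Set.contains st.2 n = false then
            (st.1 ++ [n], PySem.Set.add st.2 n)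
          else st)
        (G := fun (st : List (Int × Int) × PySem.Set (Int × Int)) d =>
          let n := ((pvT row col cell).1 + d.1, (pvT row col cell).2 + d.2)
          if PySem.Set.contains (bs.map (pvT row col)) n = true ∧
              PySem.Set.contains st.2 n = false then
            (st.1 ++ [n], PySem.Set.add st.2 n)
          else st)
        (f := fun st => (st.1.map (pvT row col), st.2.map (pvT row col)))
        (e := id) (fun st d => hstep st d) pvDirs (queue, v)
      rw [List.map_id] at htr
      rw [htr]
      exact pvBfsA_map row col bs fuel _ _ _

lemma pvGroupsA_map (row col : Int) (l : List (Int × Int)) :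
    pvGroupsA (l.map (pvT row col)) = pvGroupsA l := by
  simp only [pvGroupsA, pvSet_ofList_map, List.length_map]
  have htr := pv_foldl_map_transport
    (F := fun (st : List Int × PySem.Set (Int × Int)) rc =>
      if st.2.contains rc = true then st
      else
        (st.1 ++ [(pvBfsA (PySem.Set.ofList l) (l.length + 1) [rc] (st.2.add rc) 0).1],
          (pvBfsA (PySem.Set.ofList l) (l.length + 1) [rc] (st.2.add rc) 0).2))
    (G := fun (st : List Int × PySem.Set (Int × Int)) rc =>
      if st.2.contains rc = true then st
      else
        (st.1 ++ [(pvBfsA ((PySem.Set.ofList l).map (pvT row col)) (l.length + 1) [rc] (st.2.add rc) 0).1],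
          (pvBfsA ((PySem.Set.ofList l).map (pvT row col)) (l.length + 1) [rc] (st.2.add rc) 0).2))
    (f := fun st => (st.1, st.2.map (pvT row col)))
    (e := pvT row col)
    (fun st rc => by
      dsimp only
      rw [pvSet_contains_map]
      by_cases h : PySem.Set.contains st.2 rc = true
      · rw [if_pos h, if_pos h]
      · rw [if_neg h, if_neg h]
        have hq : [pvT row col rc] = [rc].map (pvT row col) := rfl
        rw [pvSet_add_map row col st.2 rc, hq,
          pvBfsA_map row col (PySem.Set.ofList l) (l.length + 1) [rc] _ 0])
    l ([], PySem.Set.empty)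
  have h1 := congrArg Prod.fst htr
  dsimp only [List.map_nil] at h1
  exact h1

-- ---- PySem.Dict transport along pvT on keys (and g on values) ----
def pvDMap {v v' : Type} (row col : Int) (g : v → v') (d : PySem.Dict (Int × Int) v) :
    PySem.Dict (Int × Int) v' :=
  PySem.Dict.mk (d.items.map (fun p => (pvT row col p.1, g p.2)))

lemma pvDMap_get?_list {v v' : Type} (row col : Int) (g : v → v') :
    ∀ (l : List ((Int × Int) × v)) (k : Int × Int),
      (PySem.Dict.mk (l.map (fun p => (pvT row col p.1, g p.2)))).get? (pvT row col k)
        = ((PySem.Dict.mk l).get? k).map g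
  | [], _ => rfl
  | ⟨a, b⟩ :: l, k => by
      rw [List.map_cons]
      rw [PySem.Dict.get?_mk_cons, PySem.Dict.get?_mk_cons, pvT_beq]
      by_cases h : (a == k) = true
      · rw [if_pos h, if_pos h]; rfl
      · rw [if_neg h, if_neg h]
        exact pvDMap_get?_list row col g l k

lemma pvDMap_get? {v v' : Type} (row col : Int) (g : v → v') (d : PySem.Dict (Int × Int) v)
    (k : Int × Int) :
    (pvDMap row col g d).get? (pvT row col k) = (d.get? k).map g :=
  pvDMap_get?_list row col g d.items k

lemma pvDMap_contains {v v' : Type} (row col : Int) (g : v → v') (d : PySem.Dict (Int × Int) v)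
    (k : Int × Int) :
    (pvDMap row col g d).contains (pvT row col k) = d.contains k := by
  rw [PySem.Dict.contains_eq_isSome_get?, PySem.Dict.contains_eq_isSome_get?, pvDMap_get?]
  cases d.get? k <;> rfl

lemma pvDMap_getD {v v' : Type} (row col : Int) (g : v → v') (d : PySem.Dict (Int × Int) v)
    (k : Int × Int) (dflt : v) :
    (pvDMap row col g d).getD (pvT row col k) (g dflt) = g (d.getD k dflt) := by
  rw [PySem.Dict.getD_eq_get?_getD, PySem.Dict.getD_eq_get?_getD, pvDMap_get?]
  cases d.get? k <;> rfl

lemma pvDMap_insert {v v' : Type} (row col : Int) (g : v → v') (d : PySem.Dict (Int × Int) v)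
    (k : Int × Int) (w : v) :
    pvDMap row col g (d.insert k w) = (pvDMap row col g d).insert (pvT row col k) (g w) := by
  apply PySem.Dict.ext
  show (d.insert k w).items.map (fun p => (pvT row col p.1, g p.2)) = _
  rw [PySem.Dict.items_insert, PySem.Dict.items_insert, pvDMap_contains]
  by_cases h : d.contains k = true
  · rw [if_pos h, if_pos h]
    show _ = (d.items.map (fun p => (pvT row col p.1, g p.2))).map _
    rw [List.map_map, List.map_map]
    apply List.map_congr_left
    intro ⟨a, b⟩ _
    simp only [Function.comp]
    by_cases hk : (a == k) = true
    · rw [if_pos hk]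
      have : (pvT row col a == pvT row col k) = true := by rw [pvT_beq]; exact hk
      rw [if_pos this]
    · rw [if_neg hk]
      have : ¬ (pvT row col a == pvT row col k) = true := by rw [pvT_beq]; exact hk
      rw [if_neg this]
  · rw [if_neg h, if_neg h]
    show (d.items ++ [(k, w)]).map (fun p => (pvT row col p.1, g p.2)) = _
    rw [List.map_append]
    rfl

lemma pvDMap_size {v v' : Type} (row col : Int) (g : v → v') (d : PySem.Dict (Int × Int) v) :
    (pvDMap row col g d).size = d.size := by
  show (d.items.map (fun p => (pvT row col p.1, g p.2))).length = d.items.length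
  simp

lemma pvDMap_values_id {v : Type} (row col : Int) (d : PySem.Dict (Int × Int) v) :
    (pvDMap row col (fun x : v => x) d).values = d.values := by
  show (d.items.map (fun p => (pvT row col p.1, p.2))).map (·.2) = d.items.map (·.2)
  rw [List.map_map]
  rfl

-- ---- find / union-find transport ----
lemma pvFind_map (row col : Int) (parent : PySem.Dict (Int × Int) (Int × Int)) :
    ∀ (fuel : Nat) (x : Int × Int),
      pvFind (pvDMap row col (pvT row col) parent) fuel (pvT row col x)
        = pvT row col (pvFind parent fuel x)
  | 0, _ => rfl
  | fuel + 1, x => by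
      simp only [pvFind]
      have hg : (pvDMap row col (pvT row col) parent).getD (pvT row col x) (pvT row col x)
          = pvT row col (parent.getD x x) := pvDMap_getD row col (pvT row col) parent x x
      rw [hg]
      by_cases h : parent.getD x x ≠ x
      · rw [if_pos (pvT_ne.mpr h), if_pos h]
        exact pvFind_map row col parent fuel _
      · rw [if_neg (fun hc => h (pvT_ne.mp hc)), if_neg h]

lemma pv_enumerate_map (row col : Int) :
    ∀ (l : List (Int × Int)) (s : Int),
      PySem.List.enumerate (l.map (pvT row col)) s
        = (PySem.List.enumerate l s).map (fun p => (p.1, pvT row col p.2))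
  | [], _ => by simp [PySem.List.enumerate_nil]
  | x :: l, s => by
      rw [List.map_cons, PySem.List.enumerate_cons, PySem.List.enumerate_cons, List.map_cons,
        pv_enumerate_map row col l (s + 1)]

lemma pv_slice_map (row col : Int) (l : List (Int × Int)) (a : Int) :
    PySem.List.slice (l.map (pvT row col)) (some a) none
      = (PySem.List.slice l (some a) none).map (pvT row col) := by
  rw [PySem.List.slice_some_none, PySem.List.slice_some_none, List.length_map]
  exact Eq.symm List.map_drop

lemma pvUnionAll_map (row col : Int) (l : List (Int × Int)) :
    pvUnionAll (l.map (pvT row col)) = pvDMap row col (pvT row col) (pvUnionAll l) := by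
  simp only [pvUnionAll]
  have h0 := pv_foldl_map_transport
    (F := fun (d : PySem.Dict (Int × Int) (Int × Int)) c => d.insert c c)
    (G := fun (d : PySem.Dict (Int × Int) (Int × Int)) c => d.insert c c)
    (f := pvDMap row col (pvT row col)) (e := pvT row col)
    (fun d c => (pvDMap_insert row col (pvT row col) d c c).symm)
    l PySem.Dict.empty
  have h0' : (l.map (pvT row col)).foldl
      (fun (d : PySem.Dict (Int × Int) (Int × Int)) c => d.insert c c) PySem.Dict.empty
      = pvDMap row col (pvT row col)
        (l.foldl (fun (d : PySem.Dict (Int × Int) (Int × Int)) c => d.insert c c) PySem.Dict.empty) := by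
    have : pvDMap row col (pvT row col) (PySem.Dict.empty : PySem.Dict (Int × Int) (Int × Int))
        = PySem.Dict.empty := rfl
    rw [← this]
    exact h0
  rw [h0', pv_enumerate_map]
  exact pv_foldl_map_transport
    (F := fun (parent : PySem.Dict (Int × Int) (Int × Int)) ia =>
      (PySem.List.slice l (some (ia.1 + 1)) none).foldl
        (fun parent b =>
          if |ia.2.1 - b.1| ≤ 1 ∧ |ia.2.2 - b.2| ≤ 1 then
            let ra := pvFind parent (PySem.Dict.size parent) ia.2
            let rb := pvFind parent (PySem.Dict.size parent) b
            if ra ≠ rb then parent.insert rb ra else parent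
          else parent)
        parent)
    (G := fun (parent : PySem.Dict (Int × Int) (Int × Int)) ia =>
      (PySem.List.slice (l.map (pvT row col)) (some (ia.1 + 1)) none).foldl
        (fun parent b =>
          if |ia.2.1 - b.1| ≤ 1 ∧ |ia.2.2 - b.2| ≤ 1 then
            let ra := pvFind parent (PySem.Dict.size parent) ia.2
            let rb := pvFind parent (PySem.Dict.size parent) b
            if ra ≠ rb then parent.insert rb ra else parent
          else parent)
        parent)
    (f := pvDMap row col (pvT row col)) (e := fun p => (p.1, pvT row col p.2))
    (fun parent ia => by
      dsimp only
      rw [pv_slice_map]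
      exact pv_foldl_map_transport
        (F := fun (parent : PySem.Dict (Int × Int) (Int × Int)) b =>
          if |ia.2.1 - b.1| ≤ 1 ∧ |ia.2.2 - b.2| ≤ 1 then
            let ra := pvFind parent (PySem.Dict.size parent) ia.2
            let rb := pvFind parent (PySem.Dict.size parent) b
            if ra ≠ rb then parent.insert rb ra else parent
          else parent)
        (G := fun (parent : PySem.Dict (Int × Int) (Int × Int)) b =>
          if |(pvT row col ia.2).1 - b.1| ≤ 1 ∧ |(pvT row col ia.2).2 - b.2| ≤ 1 then
            let ra := pvFind parent (PySem.Dict.size parent) (pvT row col ia.2)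
            let rb := pvFind parent (PySem.Dict.size parent) b
            if ra ≠ rb then parent.insert rb ra else parent
          else parent)
        (f := pvDMap row col (pvT row col)) (e := pvT row col)
        (fun parent b => by
          dsimp only
          have habs : (|(pvT row col ia.2).1 - (pvT row col b).1| ≤ 1 ∧
              |(pvT row col ia.2).2 - (pvT row col b).2| ≤ 1)
              ↔ (|ia.2.1 - b.1| ≤ 1 ∧ |ia.2.2 - b.2| ≤ 1) := by
            simp [pvT]
          by_cases hc : |ia.2.1 - b.1| ≤ 1 ∧ |ia.2.2 - b.2| ≤ 1
          · rw [if_pos (habs.mpr hc), if_pos hc]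
            simp only [pvDMap_size, pvFind_map]
            by_cases hne : pvFind parent (PySem.Dict.size parent) ia.2
                ≠ pvFind parent (PySem.Dict.size parent) b
            · rw [if_pos (pvT_ne.mpr hne), if_pos hne, pvDMap_insert]
            · rw [if_neg (fun hcc => hne (pvT_ne.mp hcc)), if_neg hne]
          · rw [if_neg (fun hcc => hc (habs.mp hcc)), if_neg hc])
        (PySem.List.slice l (some (ia.1 + 1)) none) parent)
    (PySem.List.enumerate l 0)
    (l.foldl (fun (d : PySem.Dict (Int × Int) (Int × Int)) c => d.insert c c) PySem.Dict.empty)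

lemma pvSizesB_map (row col : Int) (l : List (Int × Int)) :
    pvSizesB (l.map (pvT row col)) = pvSizesB l := by
  simp only [pvSizesB, pvUnionAll_map]
  have htr := pv_foldl_map_transport
    (F := fun (d : PySem.Dict (Int × Int) Int) c =>
      d.insert (pvFind (pvUnionAll l) (PySem.Dict.size (pvUnionAll l)) c)
        (d.getD (pvFind (pvUnionAll l) (PySem.Dict.size (pvUnionAll l)) c) 0 + 1))
    (G := fun (d : PySem.Dict (Int × Int) Int) c =>
      d.insert
        (pvFind (pvDMap row col (pvT row col) (pvUnionAll l))
          (PySem.Dict.size (pvDMap row col (pvT row col) (pvUnionAll l))) c)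
        (d.getD
          (pvFind (pvDMap row col (pvT row col) (pvUnionAll l))
            (PySem.Dict.size (pvDMap row col (pvT row col) (pvUnionAll l))) c) 0 + 1))
    (f := pvDMap row col (fun x : Int => x)) (e := pvT row col)
    (fun d c => by
      dsimp only
      simp only [pvDMap_size, pvFind_map]
      rw [show (pvDMap row col (fun x : Int => x) d).getD
            (pvT row col (pvFind (pvUnionAll l) (PySem.Dict.size (pvUnionAll l)) c)) 0
          = d.getD (pvFind (pvUnionAll l) (PySem.Dict.size (pvUnionAll l)) c) 0 from
        pvDMap_getD row col (fun x : Int => x) d _ 0]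
      rw [pvDMap_insert])
    l PySem.Dict.empty
  rw [show pvDMap row col (fun x : Int => x) (PySem.Dict.empty : PySem.Dict (Int × Int) Int)
      = PySem.Dict.empty from rfl] at htr
  rw [htr, pvDMap_values_id]

-- ---- phase 1: the two neighbor-collection loops build the same list ----
lemma pv_filter_foldl {α β : Type} (p : α → Prop) [DecidablePred p] (f : α → β) (q : β → Bool) :
    ∀ (l : List α) (acc : List β),
      (l.foldl (fun acc d => if p d then acc ++ [f d] else acc) acc).filter q
        = l.foldl (fun acc d => if p d ∧ q (f d) = true then acc ++ [f d] else acc) (acc.filter q)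
  | [], _ => rfl
  | d :: l, acc => by
      rw [List.foldl_cons, List.foldl_cons]
      by_cases hp : p d
      · by_cases hq : q (f d) = true
        · rw [if_pos hp, if_pos ⟨hp, hq⟩, pv_filter_foldl p f q l]
          congr 1
          simp [List.filter_append, hq]
        · rw [if_pos hp, if_neg (fun hc => hq hc.2), pv_filter_foldl p f q l]
          congr 1
          simp [List.filter_append, hq]
      · rw [if_neg hp, if_neg (fun hc => hp hc.1)]
        exact pv_filter_foldl p f q l acc

lemma pv_foldl_if_map_filter {α β : Type} (p : α → Prop) [DecidablePred p] (f : α → β) :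
    ∀ (l : List α) (acc : List β),
      l.foldl (fun acc d => if p d then acc ++ [f d] else acc) acc
        = acc ++ (l.filter (fun d => decide (p d))).map f
  | [], acc => by simp
  | d :: l, acc => by
      rw [List.foldl_cons, List.filter_cons]
      by_cases hp : p d
      · rw [if_pos hp, pv_foldl_if_map_filter p f l]
        simp [hp]
      · rw [if_neg hp, pv_foldl_if_map_filter p f l]
        simp [hp]

-- ---- the 256-case core: grouped sizes agree on every nonempty subset of the direction ring ----
set_option maxRecDepth 8000 in
lemma pv_core_eq : ∀ S ∈ pvDirs.sublists, S ≠ [] →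
    (if PySem.List.sorted (pvGroupsA S) (fun x => x) false ≠ [] then
        PySem.List.sorted (pvGroupsA S) (fun x => x) false
      else [0]) = pvSizesB S := by
  decide

-- ===== VERDICT (by name: the statement is the Claim_ definition above) =====
theorem get_clue_numbers_py_spec : Claim_equal_get_clue_numbers_py := by
  intro grid row col rows cols _ _
  unfold Spec_get_clue_numbers_py
  simp only [get_clue_numbers_py, get_clue_numbers_py_alt]
  by_cases hc : pvAt grid row col = true
  · rw [if_pos hc, if_pos hc]
  · rw [if_neg hc, if_neg hc]
    have hblack :
        (pvDirs.foldl
            (fun acc d =>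
              if 0 ≤ row + d.1 ∧ row + d.1 < rows ∧ 0 ≤ col + d.2 ∧ col + d.2 < cols then
                acc ++ [(row + d.1, col + d.2)]
              else acc) []).filter (fun rc => pvAt grid rc.1 rc.2)
        = pvDirs.foldl
            (fun acc d =>
              if (0 ≤ row + d.1 ∧ row + d.1 < rows ∧ 0 ≤ col + d.2 ∧ col + d.2 < cols) ∧
                  pvAt grid (row + d.1) (col + d.2) = true then
                acc ++ [(row + d.1, col + d.2)]
              else acc) [] := by
      exact pv_filter_foldl
        (fun d : Int × Int => 0 ≤ row + d.1 ∧ row + d.1 < rows ∧ 0 ≤ col + d.2 ∧ col + d.2 < cols)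
        (fun d => (row + d.1, col + d.2)) (fun rc => pvAt grid rc.1 rc.2) pvDirs []
    simp only [hblack]
    have hrep :
        pvDirs.foldl
            (fun acc d =>
              if (0 ≤ row + d.1 ∧ row + d.1 < rows ∧ 0 ≤ col + d.2 ∧ col + d.2 < cols) ∧
                  pvAt grid (row + d.1) (col + d.2) = true then
                acc ++ [(row + d.1, col + d.2)]
              else acc) []
          = (pvDirs.filter (fun d =>
              decide ((0 ≤ row + d.1 ∧ row + d.1 < rows ∧ 0 ≤ col + d.2 ∧ col + d.2 < cols) ∧
                pvAt grid (row + d.1) (col + d.2) = true))).map (pvT row col) := by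
      have := pv_foldl_if_map_filter
        (fun d : Int × Int =>
          (0 ≤ row + d.1 ∧ row + d.1 < rows ∧ 0 ≤ col + d.2 ∧ col + d.2 < cols) ∧
            pvAt grid (row + d.1) (col + d.2) = true)
        (pvT row col) pvDirs []
      simpa [pvT] using this
    simp only [hrep]
    set S := pvDirs.filter (fun d =>
        decide ((0 ≤ row + d.1 ∧ row + d.1 < rows ∧ 0 ≤ col + d.2 ∧ col + d.2 < cols) ∧
          pvAt grid (row + d.1) (col + d.2) = true)) with hS
    by_cases hnil : S.map (pvT row col) = []
    · rw [if_pos hnil, if_pos hnil]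
    · rw [if_neg hnil, if_neg hnil]
      have hSnil : S ≠ [] := by
        intro h
        exact hnil (by rw [h]; rfl)
      have hmem : S ∈ pvDirs.sublists := List.mem_sublists.mpr List.filter_sublist
      have hcore := pv_core_eq S hmem hSnil
      rw [pvGroupsA_map, pvSizesB_map]
      exact hcore
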